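-- pv_equiv track=rewrite | github.com/IlseMarilu/Algoritmos-de-busqueda- | matriz.py | calcular_costo
-- ===== SOURCE A (Python) =====
-- def calcular_costo(matriz, constante_magica):
--     n = len(matriz)
--     costo = 0
--
--     # Calcular la diferencia con respecto a la suma mágica
--     for i in range(n):
--         costo += abs(constante_magica - sum(matriz[i]))  # Filas
--         costo += abs(constante_magica - sum(matriz[j][i] for j in range(n)))  # Columnas
--
--     # Calcular la diferencia con respecto a las diagonales
--     costo += abs(constante_magica - sum(matriz[i][i] for i in range(n)))  # Diagonal principal
--     costo += abs(constante_magica - sum(matriz[i][n - i - 1] for i in range(n)))  # Diagonal secundaria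
--
--     return costo
-- ===== SOURCE B (Python) =====
-- def calcular_costo(matriz, constante_magica):
--     n = len(matriz)
--     col = [0] * n
--     d1 = 0
--     d2 = 0
--     costo = 0
--     # single pass over the rows: each element of the matrix is read once
--     for i in range(n):
--         fila = matriz[i]
--         costo += abs(constante_magica - sum(fila))
--         col = [c + v for c, v in zip(col, fila)]
--         d1 += fila[i]
--         d2 += fila[n - 1 - i]
--     for t in col:
--         costo += abs(constante_magica - t)
--     costo += abs(constante_magica - d1)
--     costo += abs(constante_magica - d2)
--     return costo
-- ===== Notes on version B (the rewrite author's own statement) =====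
-- stated objective: alternative
-- what changed: Single row-major pass that accumulates column sums, both diagonal sums and the row-deviation total at once, followed by one reduction, instead of A's per-index column re-scan via a generator for every i.
import Mathlib
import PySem

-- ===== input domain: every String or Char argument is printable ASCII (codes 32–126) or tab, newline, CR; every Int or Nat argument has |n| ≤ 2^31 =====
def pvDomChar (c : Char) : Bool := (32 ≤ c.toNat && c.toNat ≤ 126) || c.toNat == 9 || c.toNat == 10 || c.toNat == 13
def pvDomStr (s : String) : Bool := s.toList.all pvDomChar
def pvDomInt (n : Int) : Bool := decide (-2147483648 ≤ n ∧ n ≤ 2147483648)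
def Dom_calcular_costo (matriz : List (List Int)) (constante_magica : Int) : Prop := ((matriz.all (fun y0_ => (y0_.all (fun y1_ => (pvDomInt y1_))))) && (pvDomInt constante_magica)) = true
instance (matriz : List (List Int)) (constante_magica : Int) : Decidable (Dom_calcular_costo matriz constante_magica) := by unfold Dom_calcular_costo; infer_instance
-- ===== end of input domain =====

-- B replaces A's per-column generator re-scans by one row-major accumulation pass plus a final
-- reduction (an alternative decomposition, same asymptotic cost). Equality is proved on square-enough
-- inputs (every row at least n long), exactly where the Python A returns instead of raising IndexError.

-- Python's sum(list_of_ints)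
def pySum (l : List Int) : Int := l.foldl (· + ·) 0

-- ===== PORT A =====
-- indexing matriz[j][i] etc. is ported with getD 0; Python raises IndexError there, which Pre_ excludes
def calcular_costo (matriz : List (List Int)) (constante_magica : Int) : Int :=
  (List.range matriz.length).foldl (fun acc i =>
      acc + |constante_magica - pySum (matriz.getD i [])|
          + |constante_magica - pySum ((List.range matriz.length).map (fun j => (matriz.getD j []).getD i 0))|) 0
  + |constante_magica - pySum ((List.range matriz.length).map (fun i => (matriz.getD i []).getD i 0))|
  + |constante_magica - pySum ((List.range matriz.length).map (fun i => (matriz.getD i []).getD (matriz.length - i - 1) 0))|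

-- ===== PORT B =====
-- state (col, d1, d2, costo); fila[i] / fila[n-1-i] ported with getD 0 (IndexError excluded by Pre_)
def calcular_costo_alt (matriz : List (List Int)) (constante_magica : Int) : Int :=
  (fun s : List Int × Int × Int × Int =>
      s.1.foldl (fun a t => a + |constante_magica - t|) s.2.2.2
        + |constante_magica - s.2.1| + |constante_magica - s.2.2.1|)
    ((List.range matriz.length).foldl
      (fun (s : List Int × Int × Int × Int) i =>
        (List.zipWith (· + ·) s.1 (matriz.getD i []),
         s.2.1 + (matriz.getD i []).getD i 0,
         s.2.2.1 + (matriz.getD i []).getD (matriz.length - 1 - i) 0,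
         s.2.2.2 + |constante_magica - pySum (matriz.getD i [])|))
      (List.replicate matriz.length (0 : Int), 0, 0, 0))

-- ===== PRECONDITION & SPEC =====
-- Pre_ excludes exactly the ragged inputs (some row shorter than the number of rows), on which the
-- Python A raises IndexError while scanning a column or a diagonal.
def Pre_calcular_costo (matriz : List (List Int)) (constante_magica : Int) : Prop :=
  ∀ fila ∈ matriz, matriz.length ≤ fila.length
instance (matriz : List (List Int)) (constante_magica : Int) : Decidable (Pre_calcular_costo matriz constante_magica) := by unfold Pre_calcular_costo; infer_instance
def pvWitness_calcular_costo : List (List Int) × Int := ([[1, 2], [3, 4]], 5)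

def Spec_calcular_costo (matriz : List (List Int)) (constante_magica : Int) (out : Int) : Prop := out = calcular_costo_alt matriz constante_magica
instance (matriz : List (List Int)) (constante_magica : Int) (out : Int) : Decidable (Spec_calcular_costo matriz constante_magica out) := by unfold Spec_calcular_costo; infer_instance

-- ===== CLAIM (what is proved, stated in full; the proofs are below) =====
def Claim_equal_calcular_costo : Prop := ∀ (matriz : List (List Int)) (constante_magica : Int), Dom_calcular_costo matriz constante_magica → Pre_calcular_costo matriz constante_magica → Spec_calcular_costo matriz constante_magica (calcular_costo matriz constante_magica)

-- ===== LEMMAS AND PROOFS =====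

theorem pySum_eq_sum (l : List Int) : pySum l = l.sum := by
  have h : ∀ (l : List Int) (b : Int), l.foldl (· + ·) b = b + l.sum := by
    intro l
    induction l with
    | nil => intro b; simp
    | cons x xs ih => intro b; simp [List.foldl, ih]; ring
  simpa using h l 0

theorem foldl_abs_eq (c : Int) : ∀ (L : List Int) (b : Int),
    L.foldl (fun a t => a + |c - t|) b = b + (L.map (fun t => |c - t|)).sum := by
  intro L
  induction L with
  | nil => intro b; simp
  | cons x xs ih => intro b; simp [List.foldl, ih]; ring

-- closed form of A's interleaved row/column loop
theorem loopA (m : List (List Int)) (c : Int) (n : Nat) :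
    ∀ (L : List Nat) (b : Int),
    L.foldl (fun acc i =>
        acc + |c - pySum (m.getD i [])|
            + |c - pySum ((List.range n).map (fun j => (m.getD j []).getD i 0))|) b
      = b + (L.map (fun i => |c - pySum (m.getD i [])|)).sum
          + (L.map (fun i => |c - pySum ((List.range n).map (fun j => (m.getD j []).getD i 0))|)).sum := by
  intro L
  induction L with
  | nil => intro b; simp
  | cons x xs ih => intro b; simp only [List.foldl_cons, List.map_cons, List.sum_cons]; rw [ih]; ring

-- closed form of B's accumulation pass
theorem loopB (m : List (List Int)) (c : Int) (n : Nat)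
    (hm : ∀ fila ∈ m, n ≤ fila.length) :
    ∀ (L : List Nat), (∀ i ∈ L, i < m.length) →
    ∀ (col : List Int) (d1 d2 costo : Int), col.length = n →
    L.foldl
      (fun (s : List Int × Int × Int × Int) i =>
        (List.zipWith (· + ·) s.1 (m.getD i []),
         s.2.1 + (m.getD i []).getD i 0,
         s.2.2.1 + (m.getD i []).getD (n - 1 - i) 0,
         s.2.2.2 + |c - pySum (m.getD i [])|))
      (col, d1, d2, costo)
    = ((List.range n).map (fun j => col.getD j 0 + (L.map (fun i => (m.getD i []).getD j 0)).sum),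
       d1 + (L.map (fun i => (m.getD i []).getD i 0)).sum,
       d2 + (L.map (fun i => (m.getD i []).getD (n - 1 - i) 0)).sum,
       costo + (L.map (fun i => |c - pySum (m.getD i [])|)).sum) := by
  intro L
  induction L with
  | nil =>
    intro _ col d1 d2 costo hcol
    simp only [List.foldl_nil, List.map_nil, List.sum_nil, add_zero]
    refine congrArg (fun z => (z, d1, d2, costo)) ?_
    apply List.ext_getElem
    · simp [hcol]
    · intro j h1 h2
      simp only [List.getElem_map, List.getElem_range]
      exact (List.getD_eq_getElem col 0 h1).symm
  | cons i L ih =>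
    intro hL col d1 d2 costo hcol
    have hi : i < m.length := hL i (by simp)
    have hfila : m.getD i [] ∈ m := by
      rw [List.getD_eq_getElem m [] hi]; exact List.getElem_mem hi
    have hlen : n ≤ (m.getD i []).length := hm _ hfila
    have hcol' : (List.zipWith (· + ·) col (m.getD i [])).length = n := by
      rw [List.length_zipWith, hcol]; omega
    simp only [List.foldl_cons]
    rw [ih (fun j hj => hL j (by simp [hj])) _ _ _ _ hcol']
    simp only [List.map_cons, List.sum_cons]
    refine Prod.ext ?_ (Prod.ext (by ring) (Prod.ext (by ring) (by ring)))
    apply List.map_congr_left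
    intro j hj
    have hjn : j < n := List.mem_range.mp hj
    have hz : (List.zipWith (· + ·) col (m.getD i [])).getD j 0
        = col.getD j 0 + (m.getD i []).getD j 0 := by
      rw [List.getD_eq_getElem (List.zipWith (· + ·) col (m.getD i [])) 0 (by omega),
          List.getElem_zipWith,
          List.getD_eq_getElem col 0 (by omega),
          List.getD_eq_getElem (m.getD i []) 0 (by omega)]
    rw [hz]; ring

-- ===== VERDICT (by name: the statement is the Claim_ definition above) =====
theorem calcular_costo_spec : Claim_equal_calcular_costo := by
  intro m c _ hpre
  show calcular_costo m c = calcular_costo_alt m c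
  unfold calcular_costo calcular_costo_alt
  have hm : ∀ fila ∈ m, m.length ≤ fila.length := hpre
  rw [loopB m c m.length hm (List.range m.length)
      (fun i hi => List.mem_range.mp hi)
      (List.replicate m.length (0 : Int)) 0 0 0 (by simp)]
  simp only [foldl_abs_eq]
  rw [loopA m c m.length (List.range m.length) 0]
  have hrep : ∀ j ∈ List.range m.length,
      (fun j => (List.replicate m.length (0 : Int)).getD j 0
        + ((List.range m.length).map (fun i => (m.getD i []).getD j 0)).sum) j
      = (fun j => ((List.range m.length).map (fun i => (m.getD i []).getD j 0)).sum) j := by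
    intro j hj
    simp only
    rw [List.getD_eq_getElem (List.replicate m.length (0 : Int)) 0
        (by simpa using List.mem_range.mp hj)]
    simp
  rw [List.map_congr_left hrep]
  have hsub : ∀ i ∈ List.range m.length,
      (fun i => (m.getD i []).getD (m.length - 1 - i) 0) i
        = (fun i => (m.getD i []).getD (m.length - i - 1) 0) i := by
    intro i _
    simp only
    congr 1
    omega
  rw [List.map_congr_left hsub]
  simp only [pySum_eq_sum, List.map_map, Function.comp_def]
  ring
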